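-- pv_equiv track=rewrite | github.com/S-Christensen/cartographersStudy | scoringCards.py | faunlostthicket
-- ===== SOURCE A (Python) =====
-- def faunlostthicket(grid):
--     if not grid or not grid[0]:
--         return 0
--
--     max_length = 0
--     cols = len(grid[0])
--
--     for col in range(cols):
--         current_length = 0
--         for row in grid:
--             if row[col] == "forest":
--                 current_length += 1
--                 max_length = max(max_length, current_length)
--             else:
--                 current_length = 0
--
--     return max_length*2
-- ===== SOURCE B (Python) =====
-- def faunlostthicket(grid):
--     if not grid or not grid[0]:
--         return 0
--     cols = len(grid[0])
--     run = [0] * cols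
--     best = 0
--     for row in grid:
--         new_run = []
--         for c in range(cols):
--             if row[c] == "forest":
--                 v = run[c] + 1
--                 if v > best:
--                     best = v
--             else:
--                 v = 0
--             new_run.append(v)
--         run = new_run
--     return best * 2
-- ===== Notes on version B (the rewrite author's own statement) =====
-- stated objective: alternative
-- what changed: B makes a single row-major pass maintaining a vector of per-column run lengths and a running best, instead of A's column-major loop that rescans all rows once per column with a scalar counter.
import Mathlib
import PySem

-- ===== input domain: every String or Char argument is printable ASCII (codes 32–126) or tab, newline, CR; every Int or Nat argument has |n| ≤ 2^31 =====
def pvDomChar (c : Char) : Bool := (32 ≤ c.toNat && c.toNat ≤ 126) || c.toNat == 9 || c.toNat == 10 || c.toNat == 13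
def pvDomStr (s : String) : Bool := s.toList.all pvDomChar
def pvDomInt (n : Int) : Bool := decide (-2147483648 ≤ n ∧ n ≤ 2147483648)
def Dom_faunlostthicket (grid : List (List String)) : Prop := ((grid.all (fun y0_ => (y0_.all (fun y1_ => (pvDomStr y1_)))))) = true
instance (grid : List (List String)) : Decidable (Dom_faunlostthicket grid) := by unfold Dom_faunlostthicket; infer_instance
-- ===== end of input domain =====

-- B replaces A's column-major loop (one scalar counter, all rows rescanned per column) with a
-- single row-major pass maintaining a vector of per-column run lengths; same cost, different structure.

-- ===== PORT A =====
def faunlostthicket (grid : List (List String)) : Int :=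
  match grid with
  | [] => 0
  | r0 :: _ =>
    if r0 = [] then 0
    else
      let cols := r0.length
      let maxLen := (List.range cols).foldl (fun ml col =>
        (grid.foldl (fun (p : Int × Int) row =>
          if (PySem.List.pyGet? row ((col : Nat) : Int)).getD "" = "forest" then
            (p.1 + 1, max p.2 (p.1 + 1))
          else (0, p.2)) ((0 : Int), ml)).2) (0 : Int)
      maxLen * 2

-- ===== PORT B =====
def faunlostthicket_alt (grid : List (List String)) : Int :=
  match grid with
  | [] => 0
  | r0 :: _ =>
    if r0 = [] then 0
    else
      let cols := r0.length
      let final := grid.foldl (fun (st : List Int × Int) row =>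
        (List.range cols).foldl (fun (q : List Int × Int) c =>
          if (PySem.List.pyGet? row ((c : Nat) : Int)).getD "" = "forest" then
            let v := (PySem.List.pyGet? st.1 ((c : Nat) : Int)).getD 0 + 1
            (q.1 ++ [v], if v > q.2 then v else q.2)
          else (q.1 ++ [0], q.2)) ([], st.2))
        (List.replicate cols (0 : Int), (0 : Int))
      final.2 * 2

-- ===== PRECONDITION & SPEC =====
-- Pre_ excludes exactly the jagged grids (some row shorter than the first row), on which the
-- Python A raises IndexError (and the Python B raises IndexError too).
def Pre_faunlostthicket (grid : List (List String)) : Prop :=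
  ∀ row ∈ grid, (grid.headD []).length ≤ row.length
instance (grid : List (List String)) : Decidable (Pre_faunlostthicket grid) := by
  unfold Pre_faunlostthicket; infer_instance

def pvWitness_faunlostthicket : List (List String) :=
  [["forest", "house"], ["forest", "forest"]]

def Spec_faunlostthicket (grid : List (List String)) (out : Int) : Prop := out = faunlostthicket_alt grid
instance (grid : List (List String)) (out : Int) : Decidable (Spec_faunlostthicket grid out) := by unfold Spec_faunlostthicket; infer_instance

-- ===== CLAIM (what is proved, stated in full; the proofs are below) =====
def Claim_equal_faunlostthicket : Prop := ∀ (grid : List (List String)), Dom_faunlostthicket grid → Pre_faunlostthicket grid → Spec_faunlostthicket grid (faunlostthicket grid)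

-- ===== LEMMAS AND PROOFS =====

-- cell of `row` at column `c` (Python's row[c], totalised; all uses are in range)
def pvCell (row : List String) (c : Nat) : String :=
  (PySem.List.pyGet? row ((c : Nat) : Int)).getD ""

-- one step of A's per-column scan: state (current_length, max_length)
def pvStep (p : Int × Int) (s : String) : Int × Int :=
  if s = "forest" then (p.1 + 1, max p.2 (p.1 + 1)) else (0, p.2)

-- column c of a grid
def pvColn (grid : List (List String)) (c : Nat) : List String :=
  grid.map (fun row => pvCell row c)

-- best run of column c (scan with fresh seeds)
def pvK (grid : List (List String)) (c : Nat) : Int :=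
  (List.foldl pvStep (0, 0) (pvColn grid c)).2

-- fold of "max with a constant" splits over a max seed
theorem pv_fm_split (F : Nat → Int) (l : List Nat) (b1 : Int) :
    ∀ b2, List.foldl (fun m c => max m (F c)) (max b1 b2) l
      = max b1 (List.foldl (fun m c => max m (F c)) b2 l) := by
  induction l with
  | nil => intro b2; rfl
  | cons c l ih =>
    intro b2
    simp only [List.foldl_cons]
    rw [max_assoc]
    exact ih _

theorem pv_foldl_id {α : Type} (l : List α) (b : Int) :
    List.foldl (fun m _ => m) b l = b := by
  induction l generalizing b with
  | nil => rfl
  | cons c l ih => exact ih b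

theorem pv_foldl_le {α : Type} (u : Int → α → Int) (l : List α)
    (h : ∀ m c, m ≤ u m c) : ∀ b, b ≤ List.foldl u b l := by
  induction l with
  | nil => intro b; exact le_refl b
  | cons c l ih => intro b; exact le_trans (h b c) (ih _)

-- the max component of A's scan splits over a max seed
theorem pv_step_split (xs : List String) :
    ∀ (cur b1 b2 : Int), List.foldl pvStep (cur, max b1 b2) xs
      = ((List.foldl pvStep (cur, b2) xs).1, max b1 (List.foldl pvStep (cur, b2) xs).2) := by
  induction xs with
  | nil => intro cur b1 b2; rfl
  | cons x xs ih =>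
    intro cur b1 b2
    simp only [List.foldl_cons, pvStep]
    by_cases h : x = "forest"
    · simp only [h, if_pos]
      rw [max_assoc]
      exact ih (cur + 1) b1 (max b2 (cur + 1))
    · simp only [if_neg h]
      exact ih 0 b1 b2

theorem pv_step_seed (xs : List String) (cur b : Int) (hb : 0 ≤ b) :
    (List.foldl pvStep (cur, b) xs).2 = max b (List.foldl pvStep (cur, 0) xs).2 := by
  have h := pv_step_split xs cur b 0
  rw [max_eq_left hb] at h
  rw [h]

-- fold congruence carrying an invariant
theorem pv_foldl_congr_inv {α : Type} (l : List α) (f g : Int → α → Int) (inv : Int → Prop) :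
    ∀ b, inv b → (∀ m c, c ∈ l → inv m → f m c = g m c ∧ inv (g m c)) →
      List.foldl f b l = List.foldl g b l := by
  induction l with
  | nil => intro b _ _; rfl
  | cons c l ih =>
    intro b hb h
    simp only [List.foldl_cons]
    obtain ⟨heq, hinv⟩ := h b c (List.mem_cons_self) hb
    rw [heq]
    exact ih _ hinv (fun m x hx hm => h m x (List.mem_cons_of_mem _ hx) hm)

-- interchange: folding max (P c ⊔ Q c) equals folding P first, then Q
theorem pv_fm_interchange (P Q : Nat → Int) (l : List Nat) :
    ∀ b, List.foldl (fun m c => max m (max (P c) (Q c))) b l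
      = List.foldl (fun m c => max m (Q c)) (List.foldl (fun m c => max m (P c)) b l) l := by
  induction l with
  | nil => intro b; rfl
  | cons c l ih =>
    intro b
    simp only [List.foldl_cons]
    rw [max_comm (List.foldl (fun m c => max m (P c)) (max b (P c)) l) (Q c)]
    rw [pv_fm_split Q l (Q c)]
    rw [← ih (max b (P c))]
    rw [← pv_fm_split (fun c => max (P c) (Q c)) l (Q c)]
    congr 1
    rw [max_comm (Q c) (max b (P c)), max_assoc]

-- the column fold of per-column scans, written as a fold of maxes with pvK
theorem pv_cols_fm (grid : List (List String)) (l : List Nat) :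
    ∀ b, 0 ≤ b →
      List.foldl (fun m c => (List.foldl pvStep ((0 : Int), m) (pvColn grid c)).2) b l
        = List.foldl (fun m c => max m (pvK grid c)) b l := by
  induction l with
  | nil => intro b _; rfl
  | cons c l ih =>
    intro b hb
    simp only [List.foldl_cons]
    rw [pv_step_seed _ _ _ hb]
    exact ih _ (le_trans hb (le_max_left _ _))

-- recursive row-major specification of B's state evolution
def pvBR (cols : Nat) : List (List String) → (Nat → Int) → Int → Int
  | [], _, b => b
  | row :: rest, f, b =>
    pvBR cols rest (fun c => if pvCell row c = "forest" then f c + 1 else 0)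
      (List.foldl (fun b c => if pvCell row c = "forest" then max b (f c + 1) else b) b (List.range cols))

theorem pv_if_gt (b v : Int) : (if v > b then v else b) = max b v := by
  split_ifs with h <;> omega

-- characterisation of B's inner (per-row) loop
theorem pv_inner_char (row : List String) (run : List Int) (idxs : List Nat) :
    ∀ (acc : List Int) (b : Int),
      List.foldl (fun (q : List Int × Int) c =>
          if (PySem.List.pyGet? row ((c : Nat) : Int)).getD "" = "forest" then
            let v := (PySem.List.pyGet? run ((c : Nat) : Int)).getD 0 + 1
            (q.1 ++ [v], if v > q.2 then v else q.2)
          else (q.1 ++ [0], q.2)) (acc, b) idxs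
      = (acc ++ idxs.map (fun c => if pvCell row c = "forest"
            then (PySem.List.pyGet? run ((c : Nat) : Int)).getD 0 + 1 else 0),
         List.foldl (fun b c => if pvCell row c = "forest"
            then max b ((PySem.List.pyGet? run ((c : Nat) : Int)).getD 0 + 1) else b) b idxs) := by
  induction idxs with
  | nil => intro acc b; simp
  | cons c idxs ih =>
    intro acc b
    simp only [List.foldl_cons, List.map_cons, pvCell]
    by_cases h : (PySem.List.pyGet? row ((c : Nat) : Int)).getD "" = "forest"
    · simp only [if_pos h]
      rw [ih, pv_if_gt]
      simp [pvCell]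
    · simp only [if_neg h]
      rw [ih]
      simp [pvCell]

theorem pv_runAt_map_range (cols : Nat) (f : Nat → Int) (c : Nat) (hc : c < cols) :
    (PySem.List.pyGet? ((List.range cols).map f) ((c : Nat) : Int)).getD 0 = f c := by
  simp [hc]

-- B's outer loop equals the recursive row-major specification
theorem pv_B_outer (cols : Nat) (rows : List (List String)) :
    ∀ (f : Nat → Int) (b : Int),
      (List.foldl (fun (st : List Int × Int) row =>
        (List.range cols).foldl (fun (q : List Int × Int) c =>
          if (PySem.List.pyGet? row ((c : Nat) : Int)).getD "" = "forest" then
            let v := (PySem.List.pyGet? st.1 ((c : Nat) : Int)).getD 0 + 1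
            (q.1 ++ [v], if v > q.2 then v else q.2)
          else (q.1 ++ [0], q.2)) ([], st.2))
        (((List.range cols).map f), b) rows).2
      = pvBR cols rows f b := by
  induction rows with
  | nil => intro f b; rfl
  | cons row rest ih =>
    intro f b
    simp only [List.foldl_cons]
    rw [pv_inner_char row ((List.range cols).map f) (List.range cols) [] b]
    have hmap : (List.range cols).map (fun c => if pvCell row c = "forest"
        then (PySem.List.pyGet? ((List.range cols).map f) ((c : Nat) : Int)).getD 0 + 1 else 0)
        = (List.range cols).map (fun c => if pvCell row c = "forest" then f c + 1 else 0) := by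
      apply List.map_congr_left
      intro c hc
      rw [pv_runAt_map_range cols f c (List.mem_range.mp hc)]
    have hfold : (List.range cols).foldl (fun b c => if pvCell row c = "forest"
        then max b ((PySem.List.pyGet? ((List.range cols).map f) ((c : Nat) : Int)).getD 0 + 1) else b) b
        = (List.range cols).foldl (fun b c => if pvCell row c = "forest" then max b (f c + 1) else b) b := by
      apply PySem.List.foldl_congr_mem
      intro acc c hc
      rw [pv_runAt_map_range cols f c (List.mem_range.mp hc)]
    simp only [List.nil_append]
    rw [hmap, hfold]
    exact ih _ _

-- the row-major recursion equals the column-major fold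
theorem pv_BR_cols (cols : Nat) (rows : List (List String)) :
    ∀ (f : Nat → Int) (b : Int), 0 ≤ b →
      pvBR cols rows f b
        = List.foldl (fun m c => (List.foldl pvStep (f c, m) (pvColn rows c)).2) b (List.range cols) := by
  induction rows with
  | nil =>
    intro f b _
    exact (pv_foldl_id (List.range cols) b).symm
  | cons row rest ih =>
    intro f b hb
    have hb' : 0 ≤ List.foldl (fun b c => if pvCell row c = "forest" then max b (f c + 1) else b) b (List.range cols) := by
      refine le_trans hb (pv_foldl_le _ _ ?_ b)
      intro m c
      by_cases h : pvCell row c = "forest" <;> simp [h]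
    show pvBR cols rest _ _ = _
    rw [ih _ _ hb']
    -- rewrite b' as a fold of maxes
    have hbfold : List.foldl (fun b c => if pvCell row c = "forest" then max b (f c + 1) else b) b (List.range cols)
        = List.foldl (fun m c => max m (if pvCell row c = "forest" then f c + 1 else 0)) b (List.range cols) := by
      apply pv_foldl_congr_inv (List.range cols) _ _ (fun m => 0 ≤ m) b hb
      intro m c _ hm
      constructor
      · by_cases h : pvCell row c = "forest"
        · simp [h]
        · simp [h, max_eq_left hm]
      · by_cases h : pvCell row c = "forest" <;> simp [h]; omega
    rw [hbfold]
    -- RHS: unfold one row of every column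
    have hcol : ∀ c, pvColn (row :: rest) c = pvCell row c :: pvColn rest c := fun c => rfl
    have hrhs : List.foldl (fun m c => (List.foldl pvStep (f c, m) (pvColn (row :: rest) c)).2) b (List.range cols)
        = List.foldl (fun m c => max m (max (if pvCell row c = "forest" then f c + 1 else 0)
            ((List.foldl pvStep ((if pvCell row c = "forest" then f c + 1 else 0), 0) (pvColn rest c)).2))) b (List.range cols) := by
      apply pv_foldl_congr_inv (List.range cols) _ _ (fun m => 0 ≤ m) b hb
      intro m c _ hm
      constructor
      · rw [hcol c]
        simp only [List.foldl_cons, pvStep]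
        by_cases h : pvCell row c = "forest"
        · simp only [if_pos h]
          rw [pv_step_seed _ _ _ (le_trans hm (le_max_left m (f c + 1))), max_assoc]
        · simp only [if_neg h]
          rw [pv_step_seed _ _ _ hm, ← max_assoc, max_eq_left hm]
      · exact le_trans hm (le_max_left _ _)
    rw [hrhs]
    rw [pv_fm_interchange (fun c => if pvCell row c = "forest" then f c + 1 else 0)
      (fun c => (List.foldl pvStep ((if pvCell row c = "forest" then f c + 1 else 0), 0) (pvColn rest c)).2)
      (List.range cols) b]
    -- finally turn the Q-fold back into the scan fold
    have hb'' : (0:Int) ≤ List.foldl (fun m c => max m (if pvCell row c = "forest" then f c + 1 else 0)) b (List.range cols) := hbfold ▸ hb'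
    refine (pv_foldl_congr_inv (List.range cols)
      (fun m c => max m (List.foldl pvStep ((if pvCell row c = "forest" then f c + 1 else 0), 0) (pvColn rest c)).2)
      (fun m c => (List.foldl pvStep ((if pvCell row c = "forest" then f c + 1 else 0), m) (pvColn rest c)).2)
      (fun m => 0 ≤ m) _ hb'' ?_).symm
    intro m c _ hm
    constructor
    · exact (pv_step_seed _ _ _ hm).symm
    · show (0:Int) ≤ (List.foldl pvStep ((if pvCell row c = "forest" then f c + 1 else 0), m) (pvColn rest c)).2
      rw [pv_step_seed _ _ _ hm]
      exact le_trans hm (le_max_left _ _)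

-- A's inner fold over rows is exactly the scan over the extracted column
theorem pv_A_inner (grid : List (List String)) (c : Nat) (init : Int × Int) :
    grid.foldl (fun (p : Int × Int) row =>
        if (PySem.List.pyGet? row ((c : Nat) : Int)).getD "" = "forest" then
          (p.1 + 1, max p.2 (p.1 + 1))
        else (0, p.2)) init
      = List.foldl pvStep init (pvColn grid c) := by
  rw [pvColn, List.foldl_map]
  rfl

-- ===== VERDICT (by name: the statement is the Claim_ definition above) =====
theorem faunlostthicket_spec : Claim_equal_faunlostthicket := by
  intro grid _ _
  unfold Spec_faunlostthicket faunlostthicket faunlostthicket_alt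
  match grid with
  | [] => rfl
  | r0 :: rest =>
    by_cases h0 : r0 = []
    · simp [h0]
    · simp only [if_neg h0]
      congr 1
      -- A side
      have hA : (List.range r0.length).foldl (fun ml col =>
          ((r0 :: rest).foldl (fun (p : Int × Int) row =>
            if (PySem.List.pyGet? row ((col : Nat) : Int)).getD "" = "forest" then
              (p.1 + 1, max p.2 (p.1 + 1))
            else (0, p.2)) ((0 : Int), ml)).2) (0 : Int)
          = List.foldl (fun m c => max m (pvK (r0 :: rest) c)) 0 (List.range r0.length) := by
        have h1 : ∀ ml col, ((r0 :: rest).foldl (fun (p : Int × Int) row =>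
            if (PySem.List.pyGet? row ((col : Nat) : Int)).getD "" = "forest" then
              (p.1 + 1, max p.2 (p.1 + 1))
            else (0, p.2)) ((0 : Int), ml)) = List.foldl pvStep ((0 : Int), ml) (pvColn (r0 :: rest) col) :=
          fun ml col => pv_A_inner (r0 :: rest) col (0, ml)
        calc (List.range r0.length).foldl (fun ml col =>
              ((r0 :: rest).foldl (fun (p : Int × Int) row =>
                if (PySem.List.pyGet? row ((col : Nat) : Int)).getD "" = "forest" then
                  (p.1 + 1, max p.2 (p.1 + 1))
                else (0, p.2)) ((0 : Int), ml)).2) (0 : Int)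
            = (List.range r0.length).foldl (fun ml col =>
                (List.foldl pvStep ((0 : Int), ml) (pvColn (r0 :: rest) col)).2) (0 : Int) := by
              apply PySem.List.foldl_congr_mem
              intro acc x _
              rw [h1]
          _ = _ := pv_cols_fm (r0 :: rest) (List.range r0.length) 0 le_rfl
      -- B side
      have hrep : (List.replicate r0.length (0 : Int)) = (List.range r0.length).map (fun _ => (0 : Int)) := by
        simp [List.map_const']
      have hB : (List.foldl (fun (st : List Int × Int) row =>
          (List.range r0.length).foldl (fun (q : List Int × Int) c =>
            if (PySem.List.pyGet? row ((c : Nat) : Int)).getD "" = "forest" then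
              let v := (PySem.List.pyGet? st.1 ((c : Nat) : Int)).getD 0 + 1
              (q.1 ++ [v], if v > q.2 then v else q.2)
            else (q.1 ++ [0], q.2)) ([], st.2))
          (List.replicate r0.length (0 : Int), (0 : Int)) (r0 :: rest)).2
          = List.foldl (fun m c => max m (pvK (r0 :: rest) c)) 0 (List.range r0.length) := by
        rw [hrep, pv_B_outer r0.length (r0 :: rest) (fun _ => (0 : Int)) 0,
          pv_BR_cols r0.length (r0 :: rest) (fun _ => (0 : Int)) 0 le_rfl]
        exact pv_cols_fm (r0 :: rest) (List.range r0.length) 0 le_rfl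
      rw [hA, hB]
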